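-- pv_equiv track=rewrite | github.com/yongunt/problems | find_all_prime_numbers_in_decimal_integer/prime_in_decimal.py | extract_primes
-- ===== SOURCE A (Python) =====
-- def is_prime(n:int) -> bool:
--     if n <= 1: return False
--     if n == 2: return True
--
--     for i in range(2, n):
--         if n%i == 0: return False
--
--     return True
--
-- def extract_primes(n:int) -> list:
--     n:str = str(n)
--     ans:list = []
--     holder:list = []
--
--     for i in range(1, len(n)+1): holder.append(n[0:i])
--     for i in range(1, len(n)+1): holder.append(n[::-1][0:i])
--     for i in range(1, len(n)+1): holder.append(n[::-1][0:i][::-1])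
--     for i in n: holder.append(i)
--
--     for i in holder:
--         if '0' not in i and is_prime(int(i)):
--             if n.count(i) != ans.count(i): ans.append(i)
--
--     ans = [int(i) for i in ans]
--
--     return sorted(ans)
-- ===== SOURCE B (Python) =====
-- def is_prime(m: int) -> bool:
--     if m < 2:
--         return False
--     d = 2
--     while d * d <= m:
--         if m % d == 0:
--             return False
--         d += 1
--     return True
--
-- def extract_primes(n: int) -> list:
--     s = str(n)
--     rev = s[::-1]
--     cands = []
--     for i in range(1, len(s) + 1):
--         cands += [s[:i], rev[:i], rev[:i][::-1]]
--     cands += list(s)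
--     counts = {}
--     for c in cands:
--         if '0' not in c and is_prime(int(c)):
--             counts[c] = counts.get(c, 0) + 1
--     out = []
--     for t, c in counts.items():
--         out += [int(t)] * min(c, s.count(t))
--     return sorted(out)
-- ===== Notes on version B (the rewrite author's own statement) =====
-- stated objective: alternative
-- what changed: B builds the candidate list in one interleaved pass, groups prime candidates with a count dictionary built once, and emits each distinct candidate min(group count, substring count) times, replacing A's order-dependent conditional-append inner loop; B's trial division stops at the square root where A's runs to the value.
import Mathlib
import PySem

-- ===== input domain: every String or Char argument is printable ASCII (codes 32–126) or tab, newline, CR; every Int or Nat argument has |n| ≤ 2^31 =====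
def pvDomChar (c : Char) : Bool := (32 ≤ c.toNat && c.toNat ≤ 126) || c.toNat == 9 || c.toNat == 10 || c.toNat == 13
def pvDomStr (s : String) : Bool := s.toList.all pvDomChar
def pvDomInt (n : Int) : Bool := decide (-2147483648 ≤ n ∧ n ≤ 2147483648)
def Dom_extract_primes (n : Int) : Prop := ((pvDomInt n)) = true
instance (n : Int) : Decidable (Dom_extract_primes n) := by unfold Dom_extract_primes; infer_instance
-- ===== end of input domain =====

-- B re-groups the candidate generation into one interleaved pass, counts prime candidates with a
-- dictionary built once and emits min(group count, substring count) copies per distinct candidate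
-- (with a sqrt-bounded trial division), replacing A's conditional-append inner loop.


-- ===== PORT A =====
-- is_prime: the early-return loop 'for i in range(2, n)' rendered as recursion on the same index
def is_prime_loop (n i : Int) : Bool :=
  if _h : i < n then
    if PySem.Int.mod n i == 0 then false
    else is_prime_loop n (i + 1)
  else true
termination_by (n - i).toNat

def is_prime (n : Int) : Bool :=
  if n ≤ 1 then false
  else if n = 2 then true
  else is_prime_loop n 2

def extract_primes (n : Int) : List Int :=
  let s := PySem.Int.toChars n
  let holder : List (List Char) := []
  let holder := (PySem.List.pyRange 1 ((s.length : Int) + 1) 1).foldl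
      (fun h i => h ++ [PySem.List.slice s (some 0) (some i)]) holder
  let holder := (PySem.List.pyRange 1 ((s.length : Int) + 1) 1).foldl
      (fun h i => h ++ [PySem.List.slice (((PySem.List.slice? s none none (-1)).getD [])) (some 0) (some i)]) holder
  let holder := (PySem.List.pyRange 1 ((s.length : Int) + 1) 1).foldl
      (fun h i => h ++ [(PySem.List.slice? (PySem.List.slice ((PySem.List.slice? s none none (-1)).getD []) (some 0) (some i)) none none (-1)).getD []]) holder
  let holder := s.foldl (fun h c => h ++ [[c]]) holder
  -- int(i) raises for the '-' candidate of a negative n; Pre_ excludes negatives, so getD 0 is exact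
  let ans := holder.foldl (fun ans i =>
      if !(i.contains '0') && is_prime ((PySem.Int.ofChars? i).getD 0) then
        if PySem.Chars.count s i ≠ ans.count i then ans ++ [i] else ans
      else ans) []
  let ans := ans.map (fun i => (PySem.Int.ofChars? i).getD 0)
  PySem.List.sorted ans (fun x => x) false

-- ===== PORT B =====
-- trial-division loop 'while d*d <= m' of Source B's is_prime
def trialB (m d : Int) : Bool :=
  if h : d * d ≤ m then
    if PySem.Int.mod m d == 0 then false
    else trialB m (d + 1)
  else true
termination_by (m + 1 - d).toNat
decreasing_by
  have hd : d ≤ d * d := by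
    by_cases h0 : d ≤ 0
    · exact h0.trans (mul_self_nonneg d)
    · push Not at h0; nlinarith
  omega

def is_primeB (m : Int) : Bool :=
  if m < 2 then false else trialB m 2

def extract_primes_alt (n : Int) : List Int :=
  let s := PySem.Int.toChars n
  let rev := (PySem.List.slice? s none none (-1)).getD []
  let cands : List (List Char) := []
  let cands := (PySem.List.pyRange 1 ((s.length : Int) + 1) 1).foldl
      (fun cs i => cs ++ [PySem.List.slice s (some 0) (some i),
                          PySem.List.slice rev (some 0) (some i),
                          (PySem.List.slice? (PySem.List.slice rev (some 0) (some i)) none none (-1)).getD []]) cands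
  let cands := cands ++ s.map (fun c => [c])
  let counts := cands.foldl (fun d c =>
      if !(c.contains '0') && is_primeB ((PySem.Int.ofChars? c).getD 0) then
        d.insert c (d.getD c 0 + 1)
      else d) (PySem.Dict.empty : PySem.Dict (List Char) Int)
  let out := counts.items.foldl (fun out tc =>
      out ++ List.replicate (min tc.2 ((PySem.Chars.count s tc.1 : Int))).toNat
               ((PySem.Int.ofChars? tc.1).getD 0)) []
  PySem.List.sorted out (fun x => x) false

-- ===== PRECONDITION & SPEC =====
-- Pre_ excludes negative n, on which Python A raises ValueError (int('-') on the first candidate).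
def Pre_extract_primes (n : Int) : Prop := 0 ≤ n
instance (n : Int) : Decidable (Pre_extract_primes n) := by unfold Pre_extract_primes; infer_instance
def pvWitness_extract_primes : Int := (137)

def Spec_extract_primes (n : Int) (out : List Int) : Prop := out = extract_primes_alt n
instance (n : Int) (out : List Int) : Decidable (Spec_extract_primes n out) := by unfold Spec_extract_primes; infer_instance

-- ===== CLAIM (what is proved, stated in full; the proofs are below) =====
def Claim_equal_extract_primes : Prop := ∀ (n : Int), Dom_extract_primes n → Pre_extract_primes n → Spec_extract_primes n (extract_primes n)

-- ===== LEMMAS AND PROOFS =====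

theorem pv_filter_foldl {α β : Type} (p : α → Bool) (f : β → α → β) (l : List α) (a : β) :
    l.foldl (fun acc x => if p x then f acc x else acc) a = (l.filter p).foldl f a := by
  induction l generalizing a with
  | nil => rfl
  | cons x t ih => by_cases h : p x <;> simp [h, ih]

theorem pv_capped_count {α : Type} [BEq α] [LawfulBEq α] (cap : α → Nat) (l : List α) :
    ∀ (acc : List α), (∀ y, acc.count y ≤ cap y) → ∀ x,
      (l.foldl (fun ans i => if cap i ≠ ans.count i then ans ++ [i] else ans) acc).count x
        = min (acc.count x + l.count x) (cap x) := by
  induction l with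
  | nil => intro acc h x; simpa using (Nat.min_eq_left (h x))
  | cons i t ih =>
    intro acc h x
    by_cases hc : cap i ≠ acc.count i
    · have hlt : acc.count i < cap i := lt_of_le_of_ne (h i) (Ne.symm hc)
      simp only [List.foldl_cons, if_pos hc]
      rw [ih (acc ++ [i]) (by
        intro y
        rw [List.count_append]
        rcases eq_or_ne i y with rfl | hne
        · simp; omega
        · simp [hne]; exact h y)]
      rw [List.count_append, List.count_cons]
      rcases eq_or_ne x i with rfl | hne
      · simp; omega
      · simp [(by simpa [eq_comm] using hne : ¬ (i = x))]
    · simp only [List.foldl_cons, if_neg hc]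
      rw [ih acc h x, List.count_cons]
      push Not at hc
      rcases eq_or_ne x i with rfl | hne
      · have := h x; simp; omega
      · simp [(by simpa [eq_comm] using hne : ¬ (i = x))]


theorem trialB_false_iff (m d : Int) (hd0 : 0 ≤ d) :
    trialB m d = false ↔ ∃ e : Int, d ≤ e ∧ e * e ≤ m ∧ PySem.Int.mod m e = 0 := by
  induction d using trialB.induct m with
  | case1 d h hm =>
      rw [trialB]
      simp only [dif_pos h, if_pos hm]
      exact ⟨fun _ => ⟨d, le_refl d, h, by simpa using hm⟩, fun _ => trivial⟩
  | case2 d h hm ih =>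
      rw [trialB]
      simp only [dif_pos h, if_neg hm, ih (by omega)]
      constructor
      · rintro ⟨e, h1, h2, h3⟩; exact ⟨e, by omega, h2, h3⟩
      · rintro ⟨e, h1, h2, h3⟩
        rcases eq_or_lt_of_le h1 with rfl | hlt
        · exact absurd (by simpa using h3) (by simpa using hm)
        · exact ⟨e, by omega, h2, h3⟩
  | case3 d h =>
      rw [trialB]
      simp only [dif_neg h, Bool.true_eq_false, false_iff]
      rintro ⟨e, h1, h2, h3⟩
      have : d * d ≤ e * e := mul_le_mul h1 h1 hd0 (by omega)
      omega

theorem is_prime_loop_false_iff (n i : Int) :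
    is_prime_loop n i = false ↔ ∃ e : Int, i ≤ e ∧ e < n ∧ PySem.Int.mod n e = 0 := by
  induction i using is_prime_loop.induct n with
  | case1 i h hm =>
      rw [is_prime_loop]
      simp only [dif_pos h, if_pos hm]
      exact ⟨fun _ => ⟨i, le_refl i, h, by simpa using hm⟩, fun _ => trivial⟩
  | case2 i h hm ih =>
      rw [is_prime_loop]
      simp only [dif_pos h, if_neg hm, ih]
      constructor
      · rintro ⟨e, h1, h2, h3⟩; exact ⟨e, by omega, h2, h3⟩
      · rintro ⟨e, h1, h2, h3⟩
        rcases eq_or_lt_of_le h1 with rfl | hlt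
        · exact absurd (by simpa using h3) (by simpa using hm)
        · exact ⟨e, by omega, h2, h3⟩
  | case3 i h =>
      rw [is_prime_loop]
      simp only [dif_neg h, Bool.true_eq_false, false_iff]
      rintro ⟨e, h1, h2, h3⟩; omega

theorem is_prime_eq (m : Int) : is_prime m = is_primeB m := by
  by_cases h1 : m ≤ 1
  · simp [is_prime, is_primeB, h1, (by omega : m < 2)]
  · by_cases h2 : m = 2
    · subst h2
      simp only [is_prime, is_primeB]
      norm_num
      rw [trialB]
      norm_num
    · have h3 : 3 ≤ m := by omega
      have hA : is_prime m = is_prime_loop m 2 := by simp [is_prime, h1, h2]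
      have hB : is_primeB m = trialB m 2 := by rw [is_primeB, if_neg (by omega)]
      have hiff : (is_prime_loop m 2 = false) ↔ (trialB m 2 = false) := by
        rw [is_prime_loop_false_iff, trialB_false_iff m 2 (by norm_num)]
        constructor
        · rintro ⟨e, he2, hem, hmod⟩
          by_cases hsq : e * e ≤ m
          · exact ⟨e, he2, hsq, hmod⟩
          · obtain ⟨j, hj⟩ := (PySem.Int.mod_eq_zero_iff_dvd m e).mp hmod
            push Not at hsq
            have he0 : 0 < e := by omega
            have hj1 : 1 ≤ j := by nlinarith
            have hjne : j ≠ 1 := by rintro rfl; omega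
            have hje : j < e := by nlinarith
            refine ⟨j, by omega, by nlinarith, ?_⟩
            exact (PySem.Int.mod_eq_zero_iff_dvd m j).mpr ⟨e, by linarith [hj]⟩
        · rintro ⟨e, he2, hsq, hmod⟩
          exact ⟨e, he2, by nlinarith, hmod⟩
      rw [hA, hB]
      cases hLA : is_prime_loop m 2 <;> cases hLB : trialB m 2 <;> simp_all

theorem pv_count_filter {α : Type} [BEq α] [LawfulBEq α] (l : List α) (p : α → Bool) (x : α) :
    (l.filter p).count x = if p x then l.count x else 0 := by
  induction l with
  | nil => simp
  | cons a t ih =>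
    by_cases ha : p a
    · by_cases hx : a = x
      · subst hx; simp [ha, ih]
      · simp [ha, hx, ih]
    · have hax : ¬ (a = x ∧ p x = true) := by rintro ⟨rfl, h⟩; exact ha h
      by_cases hx : a = x <;> simp [ha, hx, ih] <;> simp_all

theorem pv_count_flatMap3 {α β : Type} [BEq β] [LawfulBEq β] (r : List α) (f1 f2 f3 : α → β) (x : β) :
    (r.flatMap fun i => [f1 i, f2 i, f3 i]).count x
      = (r.map f1).count x + ((r.map f2).count x + (r.map f3).count x) := by
  induction r with
  | nil => simp
  | cons a t ih => simp [List.count_cons, ih]; omega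

theorem pv_count_flatMap_replicate {α : Type} [BEq α] [LawfulBEq α] (keys : List α) (m : α → Nat)
    (h : keys.Nodup) (x : α) :
    (keys.flatMap fun k => List.replicate (m k) k).count x = if x ∈ keys then m x else 0 := by
  induction keys with
  | nil => simp
  | cons k t ih =>
    rcases List.nodup_cons.mp h with ⟨hk, ht⟩
    rw [List.flatMap_cons, List.count_append, ih ht, List.count_replicate]
    by_cases hx : x = k
    · subst hx; simp [hk]
    · simp [hx, (by simpa [eq_comm] using hx : ¬ (k = x))]

theorem pv_capped_count_chars (s : List Char) (l : List (List Char)) (acc : List (List Char))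
    (h : ∀ y, acc.count y ≤ PySem.Chars.count s y) (x : List Char) :
    (l.foldl (fun ans i => if PySem.Chars.count s i ≠ ans.count i then ans ++ [i] else ans) acc).count x
      = min (acc.count x + l.count x) (PySem.Chars.count s x) :=
  pv_capped_count (fun i => PySem.Chars.count s i) l acc h x

theorem pv_flatMap_replicate_map {α β : Type} (keys : List α) (m : α → Nat) (f : α → β) :
    keys.flatMap (fun k => List.replicate (m k) (f k))
      = (keys.flatMap (fun k => List.replicate (m k) k)).map f := by
  induction keys with
  | nil => simp
  | cons a t ih => simp [ih]

theorem pv_count_blocks {α β : Type} [BEq β] [LawfulBEq β] (r : List α) (f1 f2 f3 : α → β)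
    (ms : List β) (x : β) :
    List.count x (List.map f1 r ++ List.map f2 r ++ List.map f3 r ++ ms)
      = List.count x (List.flatMap (fun i => [f1 i, f2 i, f3 i]) r ++ ms) := by
  simp only [List.count_append, pv_count_flatMap3]
  omega

theorem pv_count_filter_blocks {α β : Type} [BEq β] [LawfulBEq β] (r : List α) (f1 f2 f3 : α → β)
    (ms : List β) (p : β → Bool) (x : β) :
    List.count x (List.filter p (List.map f1 r ++ List.map f2 r ++ List.map f3 r ++ ms))
      = List.count x (List.filter p (List.flatMap (fun i => [f1 i, f2 i, f3 i]) r ++ ms)) := by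
  rw [pv_count_filter, pv_count_filter, pv_count_blocks]

theorem pv_toNat_min (a b : Nat) : (min ((a : Int)) ((b : Int))).toNat = min a b := by omega

-- ===== VERDICT (by name: the statement is the Claim_ definition above) =====
theorem extract_primes_spec : Claim_equal_extract_primes := by
  intro n _ _
  show extract_primes n = extract_primes_alt n
  unfold extract_primes extract_primes_alt
  simp only [PySem.List.foldl_append_singleton_eq_map, PySem.List.foldl_append_eq_flatMap,
    List.nil_append]
  simp only [is_prime_eq]
  rw [pv_filter_foldl, pv_filter_foldl, PySem.Dict.foldl_insert_getD_add_one_eq_counter,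
    PySem.Dict.items_counter]
  rw [List.flatMap_map]
  simp only [pv_toNat_min]
  rw [pv_flatMap_replicate_map]
  apply PySem.List.sorted_eq_sorted_of_perm _ _ _ (fun a b h => h)
  apply List.Perm.map
  rw [List.perm_iff_count]
  intro x
  rw [pv_capped_count_chars (PySem.Int.toChars n) _ [] (by simp) x,
    pv_count_flatMap_replicate _ _ (PySem.Set.nodup_ofList _) x]
  rw [List.count_nil, Nat.zero_add, pv_count_filter_blocks]
  split_ifs with hx
  · rfl
  · have hx' : x ∉ (List.filter (fun i => !i.contains '0' && is_primeB ((PySem.Int.ofChars? i).getD 0))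
        (List.flatMap
            (fun x =>
              [PySem.List.slice (PySem.Int.toChars n) (some 0) (some x),
                PySem.List.slice ((PySem.List.slice? (PySem.Int.toChars n) none none (-1)).getD []) (some 0)
                  (some x),
                (PySem.List.slice?
                      (PySem.List.slice ((PySem.List.slice? (PySem.Int.toChars n) none none (-1)).getD []) (some 0)
                        (some x))
                      none none (-1)).getD
                  []])
            (PySem.List.pyRange 1 (↑(PySem.Int.toChars n).length + 1)) ++
          List.map (fun x => [x]) (PySem.Int.toChars n))) := by
      intro hmem
      exact hx ((PySem.Set.mem_ofList _ _).mpr hmem)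
    rw [List.count_eq_zero.mpr hx']
    simp
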